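-- pv_equiv track=rewrite | github.com/deepakrkris/DsAlgo | algorithms/day01/min_window_subsequence.py | moving_window_partial
-- ===== SOURCE A (Python) =====
-- def moving_window_partial(str1, str2) :
--     minLength = 0
--     minMatch = ""
--
--     windowPtr = 0
--     substrPtr = 0
--     startIndex = 0
--
--     while windowPtr < len(str1) :
--         if str1[windowPtr] == str2[substrPtr] :
--             if substrPtr == 0 :
--                 startIndex = windowPtr
--             substrPtr = substrPtr + 1
--
--         if substrPtr == len(str2) :
--             if minLength > len(str1[startIndex : windowPtr]) or minLength == 0:
--                 minMatch = str1[startIndex : windowPtr + 1]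
--                 minLength = len(minMatch)
--             substrPtr = 0
--
--         windowPtr = windowPtr + 1
--
--     return (minLength, minMatch)
-- ===== SOURCE B (Python) =====
-- def moving_window_partial(str1, str2):
--     # Phase 1: collect the greedy non-overlapping match windows by jumping with str.find.
--     if not str2:
--         return (0, "")
--     windows = []
--     pos = 0
--     while True:
--         start = str1.find(str2[0], pos)
--         if start == -1:
--             break
--         end = start
--         for c in str2[1:]:
--             end = str1.find(c, end + 1)
--             if end == -1:
--                 break
--         if end == -1:
--             break
--         windows.append((start, end))
--         pos = end + 1
--     # Phase 2: keep the window of minimal length; on ties the later window wins.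
--     best_len, best = 0, ""
--     for s, e in windows:
--         length = e - s + 1
--         if best_len == 0 or length <= best_len:
--             best_len, best = length, str1[s:e + 1]
--     return (best_len, best)
-- ===== Notes on version B (the rewrite author's own statement) =====
-- stated objective: alternative
-- what changed: B splits the work into two phases: it first collects the greedy non-overlapping match windows by jumping with str.find (C-level scanning, instead of A's per-character Python state machine over str1), then reduces the window list to the minimal-length window (later window wins ties); on empty str2, where A raises IndexError, B returns (0, '').
import Mathlib
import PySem

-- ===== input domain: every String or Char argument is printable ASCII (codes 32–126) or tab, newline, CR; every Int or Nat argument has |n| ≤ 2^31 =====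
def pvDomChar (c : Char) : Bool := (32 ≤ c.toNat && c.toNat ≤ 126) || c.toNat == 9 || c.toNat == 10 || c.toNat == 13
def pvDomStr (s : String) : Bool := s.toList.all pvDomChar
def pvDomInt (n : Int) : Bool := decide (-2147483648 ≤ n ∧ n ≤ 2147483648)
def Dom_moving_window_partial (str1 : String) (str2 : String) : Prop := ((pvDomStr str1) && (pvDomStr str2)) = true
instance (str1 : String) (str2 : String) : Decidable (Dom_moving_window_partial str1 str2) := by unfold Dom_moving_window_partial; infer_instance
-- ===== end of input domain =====

-- B collects the greedy match windows by jumping with str.find and then reduces the list to the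
-- minimal-length window (alternative decomposition, same cost); where A raises on empty str2, B returns (0, "").

-- ===== PORT A =====
-- A's while loop over windowPtr with state (substrPtr, startIndex, minLength, minMatch);
-- strings are handled as their char lists (string slicing = list slicing, exact).
def aLoop (l1 l2 : List Char) (i ptr start minL : Nat) (minM : List Char) : Int × String :=
  if h : i < l1.length then
    match PySem.List.pyGet? l2 (ptr : Int) with
    | none => (0, "")  -- Python raises IndexError here (str2 exhausted); excluded by Pre_
    | some c2 =>
      let ptr1 := if l1[i] = c2 then ptr + 1 else ptr
      let start1 := if l1[i] = c2 then (if ptr = 0 then i else start) else start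
      if ptr1 = l2.length then
        if minL > (PySem.List.slice l1 (some (start1 : Int)) (some (i : Int))).length ∨ minL = 0 then
          let m := PySem.List.slice l1 (some (start1 : Int)) (some ((i : Int) + 1))
          aLoop l1 l2 (i + 1) 0 start1 m.length m
        else aLoop l1 l2 (i + 1) 0 start1 minL minM
      else aLoop l1 l2 (i + 1) ptr1 start1 minL minM
  else ((minL : Int), String.ofList minM)
termination_by l1.length - i

def moving_window_partial (str1 : String) (str2 : String) : Int × String :=
  aLoop str1.toList str2.toList 0 0 0 0 []

-- ===== PORT B =====
-- Source B inner loop: for c in str2[1:]: end = str1.find(c, end + 1); break on -1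
def bMatch (l1 : List Char) (cs : List Char) (e : Int) : Int :=
  match cs with
  | [] => e
  | c :: rest =>
    let e' := PySem.Chars.findFrom l1 [c] (e + 1) none
    if e' = -1 then -1 else bMatch l1 rest e'

-- Source B outer while True loop (fuel only makes it total; Python's loop always terminates)
def bCollect (l1 : List Char) (c0 : Char) (rest : List Char) : Nat → Int → List (Int × Int)
  | 0, _ => []
  | fuel + 1, pos =>
    let st := PySem.Chars.findFrom l1 [c0] pos none
    if st = -1 then []
    else
      let e := bMatch l1 rest st
      if e = -1 then []
      else (st, e) :: bCollect l1 c0 rest fuel (e + 1)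

def moving_window_partial_alt (str1 : String) (str2 : String) : Int × String :=
  match str2.toList with
  | [] => (0, "")
  | c0 :: rest =>
    let ws := bCollect str1.toList c0 rest (str1.toList.length + 1) 0
    ws.foldl (fun acc w =>
      if acc.1 = 0 ∨ w.2 - w.1 + 1 ≤ acc.1 then
        (w.2 - w.1 + 1, String.ofList (PySem.List.slice str1.toList (some w.1) (some (w.2 + 1))))
      else acc) ((0 : Int), "")

-- ===== PRECONDITION & SPEC =====
-- Pre_ excludes exactly the inputs on which A raises IndexError: empty str2 with non-empty str1.
def Pre_moving_window_partial (str1 : String) (str2 : String) : Prop := str2 ≠ "" ∨ str1 = ""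
instance (str1 : String) (str2 : String) : Decidable (Pre_moving_window_partial str1 str2) := by unfold Pre_moving_window_partial; infer_instance

def pvWitness_moving_window_partial : String × String := ("abcab", "ab")

def Spec_moving_window_partial (str1 : String) (str2 : String) (out : Int × String) : Prop := out = moving_window_partial_alt str1 str2
instance (str1 : String) (str2 : String) (out : Int × String) : Decidable (Spec_moving_window_partial str1 str2 out) := by unfold Spec_moving_window_partial; infer_instance

-- ===== CLAIM (what is proved, stated in full; the proofs are below) =====
def Claim_equal_moving_window_partial : Prop := ∀ (str1 : String) (str2 : String), Dom_moving_window_partial str1 str2 → Pre_moving_window_partial str1 str2 → Spec_moving_window_partial str1 str2 (moving_window_partial str1 str2)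


-- ===== LEMMAS AND PROOFS =====

-- Spec layer: first occurrence of c at index >= k
def cfind (l1 : List Char) (c : Char) (k : Nat) : Option Nat :=
  if h : k < l1.length then (if l1[k] = c then some k else cfind l1 c (k + 1)) else none
termination_by l1.length - k

-- chain of first occurrences for cs starting at position >= i; returns end index + 1
def cchain (l1 : List Char) : List Char → Nat → Option Nat
  | [], i => some i
  | c :: rest, i => match cfind l1 c i with
    | none => none
    | some e => cchain l1 rest (e + 1)

-- the greedy non-overlapping windows, spec form
def wins (l1 : List Char) (c0 : Char) (rest : List Char) : Nat → Nat → List (Nat × Nat)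
  | 0, _ => []
  | fuel + 1, pos =>
    match cfind l1 c0 pos with
    | none => []
    | some s => match cchain l1 rest (s + 1) with
      | none => []
      | some q => (s, q - 1) :: wins l1 c0 rest fuel q

def selStep (l1 : List Char) (acc : Nat × List Char) (w : Nat × Nat) : Nat × List Char :=
  if acc.1 = 0 ∨ w.2 - w.1 + 1 ≤ acc.1 then (w.2 - w.1 + 1, (l1.drop w.1).take (w.2 + 1 - w.1)) else acc

def aFinal (p : Nat × List Char) : Int × String := ((p.1 : Int), String.ofList p.2)

theorem cfind_none_spec' (l1 : List Char) (c : Char) (k : Nat) (h : cfind l1 c k = none) :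
    ∀ j, k ≤ j → j < l1.length → l1[j]? ≠ some c := by
  intro j h1 h2
  rw [cfind] at h
  by_cases hk : k < l1.length
  · rw [dif_pos hk] at h
    by_cases hc : l1[k] = c
    · rw [if_pos hc] at h; cases h
    · rw [if_neg hc] at h
      rcases Nat.eq_or_lt_of_le h1 with rfl | hlt
      · simp [List.getElem?_eq_getElem h2, hc]
      · exact cfind_none_spec' l1 c (k+1) h j hlt h2
  · omega
termination_by l1.length - k

theorem cfind_some_spec' (l1 : List Char) (c : Char) (k e : Nat) (h : cfind l1 c k = some e) :
    k ≤ e ∧ e < l1.length ∧ l1[e]? = some c ∧ ∀ j, k ≤ j → j < e → l1[j]? ≠ some c := by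
  rw [cfind] at h
  by_cases hk : k < l1.length
  · rw [dif_pos hk] at h
    by_cases hc : l1[k] = c
    · rw [if_pos hc] at h
      obtain rfl : k = e := by simpa using h
      exact ⟨le_refl _, hk, by simp [List.getElem?_eq_getElem hk, hc], by omega⟩
    · rw [if_neg hc] at h
      obtain ⟨h1, h2, h3, h4⟩ := cfind_some_spec' l1 c (k+1) e h
      refine ⟨by omega, h2, h3, ?_⟩
      intro j hj1 hj2
      rcases Nat.eq_or_lt_of_le hj1 with rfl | hlt
      · simp [List.getElem?_eq_getElem hk, hc]
      · exact h4 j hlt hj2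
  · rw [dif_neg hk] at h; cases h
termination_by l1.length - k

theorem cchain_bounds' (l1 : List Char) (cs : List Char) : ∀ (i q : Nat),
    cchain l1 cs i = some q → 1 ≤ i → i ≤ l1.length →
    i ≤ q ∧ 1 ≤ q ∧ q - 1 < l1.length := by
  induction cs with
  | nil => intro i q h h1 h2; simp [cchain] at h; omega
  | cons c rest ih =>
    intro i q h h1 h2
    rw [cchain] at h
    cases hf : cfind l1 c i with
    | none => simp [hf] at h
    | some e =>
      simp only [hf] at h
      obtain ⟨he1, he2, -, -⟩ := cfind_some_spec' l1 c i e hf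
      obtain ⟨q1, q2, q3⟩ := ih (e+1) q h (by omega) (by omega)
      exact ⟨by omega, q2, q3⟩

theorem wins_bounds' (l1 : List Char) (c0 : Char) (rest : List Char) : ∀ (fuel : Nat)
    (pos : Nat) (w : Nat × Nat), w ∈ wins l1 c0 rest fuel pos → w.1 ≤ w.2 ∧ w.2 < l1.length := by
  intro fuel
  induction fuel with
  | zero => intro pos w h; simp [wins] at h
  | succ fuel ih =>
    intro pos w h
    rw [wins] at h
    cases hf : cfind l1 c0 pos with
    | none => simp [hf] at h
    | some s =>
      simp only [hf] at h
      cases hc : cchain l1 rest (s+1) with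
      | none => simp [hc] at h
      | some q =>
        simp only [hc, List.mem_cons] at h
        obtain ⟨hs1, hs2, -, -⟩ := cfind_some_spec' l1 c0 pos s hf
        obtain ⟨q1, q2, q3⟩ := cchain_bounds' l1 rest (s+1) q hc (by omega) (by omega)
        rcases h with rfl | h
        · exact ⟨by omega, by omega⟩
        · exact ih q w h

theorem A_skip' (l1 l2 : List Char) (c : Char) (ptr i start mL : Nat) (mM : List Char)
    (hget : l2[ptr]? = some c) (hnone : cfind l1 c i = none) :
    aLoop l1 l2 i ptr start mL mM = ((mL : Int), String.ofList mM) := by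
  rw [aLoop]
  by_cases h : i < l1.length
  · rw [dif_pos h]
    have hptr : ptr < l2.length := by
      by_contra hp
      rw [List.getElem?_eq_none (by omega)] at hget; cases hget
    have hc : ¬ l1[i]'h = c := by
      have := cfind_none_spec' l1 c i hnone i (le_refl _) h
      simp [List.getElem?_eq_getElem h] at this; exact this
    have hnone' : cfind l1 c (i+1) = none := by
      rw [cfind, dif_pos h, if_neg hc] at hnone; exact hnone
    simp only [PySem.List.pyGet?_natCast, hget]
    rw [if_neg hc, if_neg hc]
    rw [if_neg (by omega : ¬ ptr = l2.length)]
    exact A_skip' l1 l2 c ptr (i+1) start mL mM hget hnone'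
  · rw [dif_neg h]
termination_by l1.length - i

theorem A_to' (l1 l2 : List Char) (c : Char) (ptr i e start mL : Nat) (mM : List Char)
    (hget : l2[ptr]? = some c) (hsome : cfind l1 c i = some e) :
    aLoop l1 l2 i ptr start mL mM = aLoop l1 l2 e ptr start mL mM := by
  rcases eq_or_ne i e with rfl | hne
  · rfl
  · have h : i < l1.length := by
      rw [cfind] at hsome
      by_cases h : i < l1.length
      · exact h
      · rw [dif_neg h] at hsome; cases hsome
    have hc : ¬ l1[i]'h = c := by
      intro hc
      rw [cfind, dif_pos h, if_pos hc] at hsome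
      exact hne (by simpa using hsome)
    have hsome' : cfind l1 c (i+1) = some e := by
      rw [cfind, dif_pos h, if_neg hc] at hsome; exact hsome
    have hptr : ptr < l2.length := by
      by_contra hp
      rw [List.getElem?_eq_none (by omega)] at hget; cases hget
    rw [aLoop, dif_pos h]
    simp only [PySem.List.pyGet?_natCast, hget]
    rw [if_neg hc, if_neg hc]
    rw [if_neg (by omega : ¬ ptr = l2.length)]
    exact A_to' l1 l2 c ptr (i+1) e start mL mM hget hsome'
termination_by l1.length - i

theorem A_mid' (l1 pre cs : List Char) (i start mL : Nat) (mM : List Char)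
    (hpre : pre ≠ []) (hcs : cs ≠ []) (hsi : start < i) (hil : i ≤ l1.length) :
    aLoop l1 (pre ++ cs) i pre.length start mL mM =
      (match cchain l1 cs i with
       | none => ((mL : Int), String.ofList mM)
       | some q =>
           aLoop l1 (pre ++ cs) q 0 start (selStep l1 (mL, mM) (start, q - 1)).1
             (selStep l1 (mL, mM) (start, q - 1)).2) := by
  match cs, hcs with
  | c :: rest, _ =>
  have hget : (pre ++ c :: rest)[pre.length]? = some c := by
    have h := PySem.List.pyGet?_append_length pre rest c
    rwa [PySem.List.pyGet?_natCast] at h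
  cases hf : cfind l1 c i with
  | none =>
    rw [A_skip' l1 (pre ++ c :: rest) c pre.length i start mL mM hget hf]
    simp [cchain, hf]
  | some e =>
    obtain ⟨he1, he2, he3, -⟩ := cfind_some_spec' l1 c i e hf
    have hle : l1[e]'he2 = c := by
      rw [List.getElem?_eq_getElem he2] at he3; simpa using he3
    have hchain : cchain l1 (c :: rest) i = cchain l1 rest (e + 1) := by
      simp [cchain, hf]
    rw [A_to' l1 (pre ++ c :: rest) c pre.length i e start mL mM hget hf]
    rw [aLoop, dif_pos he2]
    simp only [PySem.List.pyGet?_natCast, hget, hle, if_true]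
    rw [if_neg (by simpa using hpre : ¬ pre.length = 0)]
    match rest with
    | [] =>
      have hlen : pre.length + 1 = (pre ++ [c]).length := by simp
      rw [if_pos hlen]
      have hq : cchain l1 ([c] : List Char) i = some (e + 1) := by simp [cchain, hf]
      rw [hq]
      have hsltlen : start < l1.length := by omega
      have hslice : (PySem.List.slice l1 (some (start : Int)) (some (e : Int))).length = e - start := by
        rw [PySem.List.length_slice, PySem.List.clampIdx_natCast, PySem.List.clampIdx_natCast]
        omega
      have hcast : ((e : Int) + 1) = ((e + 1 : Nat) : Int) := by push_cast; ring
      have hslice2 : PySem.List.slice l1 (some ((start : Nat) : Int)) (some ((e : Int) + 1)) =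
          (l1.drop start).take (e + 1 - start) := by
        rw [hcast, PySem.List.slice_natCast]
      have hlen2 : ((l1.drop start).take (e + 1 - start)).length = e - start + 1 := by
        simp [List.length_take, List.length_drop]; omega
      simp only [hslice, hslice2, hlen2]
      by_cases hcond : mL = 0 ∨ e - start + 1 ≤ mL
      · rw [if_pos (by omega : mL > e - start ∨ mL = 0)]
        simp only [selStep, Nat.add_sub_cancel, if_pos hcond]
      · rw [if_neg (by omega : ¬ (mL > e - start ∨ mL = 0))]
        simp only [selStep, Nat.add_sub_cancel, if_neg hcond]
    | r :: rs =>
      have hlen : ¬ (pre.length + 1 = (pre ++ c :: r :: rs).length) := by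
        simp only [List.length_append, List.length_cons]; omega
      rw [if_neg hlen]
      have hassoc : pre ++ c :: r :: rs = (pre ++ [c]) ++ r :: rs := by simp
      have hlen3 : pre.length + 1 = (pre ++ [c]).length := by simp
      rw [hchain, hassoc, hlen3]
      rw [A_mid' l1 (pre ++ [c]) (r :: rs) (e + 1) start mL mM (by simp) (by simp)
        (by omega) (by omega)]
  termination_by cs.length

theorem A_top' (l1 : List Char) (c0 : Char) (rest : List Char) : ∀ (fuel : Nat)
    (i start mL : Nat) (mM : List Char), l1.length ≤ i + fuel →
    aLoop l1 (c0 :: rest) i 0 start mL mM =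
      aFinal (List.foldl (selStep l1) (mL, mM) (wins l1 c0 rest fuel i)) := by
  intro fuel
  induction fuel with
  | zero =>
    intro i start mL mM hfuel
    rw [aLoop, dif_neg (by omega : ¬ i < l1.length), wins]
    rfl
  | succ fuel ih =>
    intro i start mL mM hfuel
    have hget : (c0 :: rest)[0]? = some c0 := rfl
    rw [wins]
    cases hf : cfind l1 c0 i with
    | none => rw [A_skip' l1 (c0 :: rest) c0 0 i start mL mM hget hf]; rfl
    | some s =>
      obtain ⟨hs1, hs2, hs3, -⟩ := cfind_some_spec' l1 c0 i s hf
      have hls : l1[s]'hs2 = c0 := by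
        rw [List.getElem?_eq_getElem hs2] at hs3; simpa using hs3
      rw [A_to' l1 (c0 :: rest) c0 0 i s start mL mM hget hf]
      rw [aLoop, dif_pos hs2]
      simp only [PySem.List.pyGet?_natCast, hget, hls, if_true]
      match rest with
      | [] =>
        rw [if_pos (by simp : (0:Nat) + 1 = ([c0] : List Char).length)]
        have hq : cchain l1 ([] : List Char) (s + 1) = some (s + 1) := rfl
        rw [hq]
        have hslice : (PySem.List.slice l1 (some (s : Int)) (some (s : Int))).length = 0 := by
          rw [PySem.List.length_slice]; omega
        have hcast : ((s : Int) + 1) = ((s + 1 : Nat) : Int) := by push_cast; ring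
        have hslice2 : PySem.List.slice l1 (some ((s : Nat) : Int)) (some ((s : Int) + 1)) =
            (l1.drop s).take (s + 1 - s) := by
          rw [hcast, PySem.List.slice_natCast]
        have hlen2 : ((l1.drop s).take (s + 1 - s)).length = 1 := by
          simp [List.length_take, List.length_drop]; omega
        rw [if_pos (by rw [hslice]; omega : mL > (PySem.List.slice l1 (some (s : Int)) (some (s : Int))).length ∨ mL = 0)]
        rw [ih (s + 1) s _ _ (by omega)]
        simp only [Nat.add_sub_cancel, List.foldl_cons]
        congr 2
        simp only [selStep, Nat.sub_self]
        rw [if_pos (by omega)]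
        rw [hslice2, hlen2]
      | r :: rs =>
        rw [if_neg (by simp : ¬ ((0:Nat) + 1 = (c0 :: r :: rs : List Char).length))]
        have hmid := A_mid' l1 [c0] (r :: rs) (s + 1) s mL mM (by simp) (by simp) (by omega) (by omega)
        simp only [List.length_cons, List.length_nil, List.singleton_append, Nat.zero_add] at hmid
        rw [show c0 :: r :: rs = [c0] ++ (r :: rs) from rfl] at hmid
        simp only [Nat.zero_add]
        rw [show c0 :: r :: rs = [c0] ++ (r :: rs) from rfl, hmid]
        cases hc : cchain l1 (r :: rs) (s + 1) with
        | none => rfl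
        | some q =>
          dsimp only
          obtain ⟨hq1, hq2, hq3⟩ := cchain_bounds' l1 (r :: rs) (s + 1) q hc (by omega) (by omega)
          rw [show ([c0] ++ r :: rs : List Char) = c0 :: r :: rs from rfl]
          rw [ih q s _ _ (by omega), List.foldl_cons]

theorem singleton_prefix_iff' (c : Char) (l : List Char) : [c] <+: l ↔ l[0]? = some c := by
  cases l with
  | nil => simp
  | cons a t => simp [List.cons_prefix_cons]; exact eq_comm

theorem find_eq_cfind' (l1 : List Char) (c : Char) (k : Nat) (hk : k ≤ l1.length) :
    PySem.Chars.findFrom l1 [c] (k : Int) none =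
      (match cfind l1 c k with | none => -1 | some e => (e : Int)) := by
  cases hc : cfind l1 c k with
  | none =>
    dsimp only
    rw [PySem.Chars.findFrom_natCast_eq_neg_one_iff l1 [c] k hk]
    rw [List.singleton_infix_iff]
    intro hmem
    obtain ⟨j, hj, hje⟩ := List.mem_iff_getElem.mp hmem
    have hlen : k + j < l1.length := by simp [List.length_drop] at hj; omega
    have : l1[k + j]? = some c := by
      rw [List.getElem?_eq_getElem hlen]
      rw [List.getElem_drop] at hje
      simp [hje]
    exact cfind_none_spec' l1 c k hc (k + j) (by omega) hlen this
  | some e =>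
    dsimp only
    obtain ⟨he1, he2, he3, he4⟩ := cfind_some_spec' l1 c k e hc
    have hmem : c ∈ l1.drop k := by
      have : (l1.drop k)[e - k]? = some c := by
        rw [List.getElem?_drop]
        rwa [show k + (e - k) = e by omega]
      exact List.mem_of_getElem? this
    have hne : PySem.Chars.findFrom l1 [c] (k : Int) none ≠ -1 := by
      intro h
      have hni := (PySem.Chars.findFrom_natCast_eq_neg_one_iff l1 [c] k hk).mp h
      rw [List.singleton_infix_iff] at hni
      exact hni hmem
    obtain ⟨hr1, hr2, hr3⟩ := PySem.Chars.findFrom_natCast_spec l1 [c] k hk hne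
    set f := PySem.Chars.findFrom l1 [c] (k : Int) none with hf
    have hkr : k ≤ f.toNat := by omega
    have hrlen : f.toNat < l1.length := by
      rcases hr2 with ⟨t, ht⟩
      have : (l1.drop f.toNat).length ≠ 0 := by rw [← ht]; simp
      simp [List.length_drop] at this; omega
    have hrc : l1[f.toNat]? = some c := by
      have h0 := (singleton_prefix_iff' c (l1.drop f.toNat)).mp hr2
      rwa [List.getElem?_drop, Nat.add_zero] at h0
    have hre : f.toNat = e := by
      by_contra hneq
      rcases Nat.lt_or_ge f.toNat e with hlt | hge
      · exact he4 f.toNat hkr hlt hrc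
      · have helt : e < f.toNat := by omega
        apply hr3 e he1 helt
        rw [singleton_prefix_iff' c (l1.drop e), List.getElem?_drop, Nat.add_zero]
        exact he3
    omega

theorem bMatch_eq' (l1 : List Char) (cs : List Char) : ∀ (en : Nat), en < l1.length →
    bMatch l1 cs (en : Int) =
      (match cchain l1 cs (en + 1) with | none => -1 | some q => ((q - 1 : Nat) : Int)) := by
  induction cs with
  | nil => intro en hen; simp [bMatch, cchain]
  | cons c rest ih =>
    intro en hen
    rw [bMatch]
    have hcast : ((en : Int) + 1) = ((en + 1 : Nat) : Int) := by push_cast; ring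
    rw [hcast, find_eq_cfind' l1 c (en + 1) (by omega)]
    cases hf : cfind l1 c (en + 1) with
    | none => simp [cchain, hf]
    | some e2 =>
      obtain ⟨h1, h2, -, -⟩ := cfind_some_spec' l1 c (en + 1) e2 hf
      dsimp only
      rw [if_neg (by omega : ¬ ((e2 : Int) = -1))]
      rw [ih e2 h2]
      simp [cchain, hf]

theorem bCollect_eq' (l1 : List Char) (c0 : Char) (rest : List Char) : ∀ (fuel : Nat)
    (pos : Nat), pos ≤ l1.length →
    bCollect l1 c0 rest fuel (pos : Int) =
      (wins l1 c0 rest fuel pos).map (fun w => ((w.1 : Int), (w.2 : Int))) := by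
  intro fuel
  induction fuel with
  | zero => intro pos hpos; simp [bCollect, wins]
  | succ fuel ih =>
    intro pos hpos
    rw [bCollect, wins, find_eq_cfind' l1 c0 pos hpos]
    cases hf : cfind l1 c0 pos with
    | none => simp
    | some s =>
      obtain ⟨hs1, hs2, -, -⟩ := cfind_some_spec' l1 c0 pos s hf
      dsimp only
      rw [if_neg (by omega : ¬ ((s : Int) = -1))]
      rw [bMatch_eq' l1 rest s hs2]
      cases hc : cchain l1 rest (s + 1) with
      | none => simp
      | some q =>
        obtain ⟨hq1, hq2, hq3⟩ := cchain_bounds' l1 rest (s + 1) q hc (by omega) (by omega)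
        dsimp only
        rw [if_neg (by omega : ¬ (((q - 1 : Nat) : Int) = -1))]
        have hcast : ((q - 1 : Nat) : Int) + 1 = ((q : Nat) : Int) := by omega
        rw [hcast, ih q (by omega)]
        simp

theorem B_fold' (l1 : List Char) : ∀ (ws : List (Nat × Nat)) (aL : Nat) (aM : List Char),
    (∀ w ∈ ws, w.1 ≤ w.2 ∧ w.2 < l1.length) →
    List.foldl (fun (acc : Int × String) (w : Int × Int) =>
        if acc.1 = 0 ∨ w.2 - w.1 + 1 ≤ acc.1 then
          (w.2 - w.1 + 1, String.ofList (PySem.List.slice l1 (some w.1) (some (w.2 + 1))))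
        else acc) ((aL : Int), String.ofList aM)
      (ws.map (fun w => ((w.1 : Int), (w.2 : Int))))
    = aFinal (List.foldl (selStep l1) (aL, aM) ws) := by
  intro ws
  induction ws with
  | nil => intro aL aM h; rfl
  | cons w tl ih =>
    intro aL aM h
    obtain ⟨hw1, hw2⟩ := h w (List.mem_cons_self)
    rw [List.map_cons, List.foldl_cons, List.foldl_cons]
    have hcast : ((w.2 : Int) + 1) = ((w.2 + 1 : Nat) : Int) := by push_cast; ring
    have hslice : PySem.List.slice l1 (some ((w.1 : Nat) : Int)) (some ((w.2 : Int) + 1)) =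
        (l1.drop w.1).take (w.2 + 1 - w.1) := by
      rw [hcast, PySem.List.slice_natCast]
    have hLcast : ((w.2 : Int) - (w.1 : Int) + 1) = ((w.2 - w.1 + 1 : Nat) : Int) := by
      push_cast; omega
    by_cases hcond : aL = 0 ∨ w.2 - w.1 + 1 ≤ aL
    · rw [if_pos (by omega : ((aL : Nat) : Int) = 0 ∨ (w.2 : Int) - (w.1 : Int) + 1 ≤ ((aL : Nat) : Int))]
      rw [hslice, hLcast]
      rw [show selStep l1 (aL, aM) w = (w.2 - w.1 + 1, (l1.drop w.1).take (w.2 + 1 - w.1)) by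
        simp only [selStep, if_pos hcond]]
      exact ih (w.2 - w.1 + 1) ((l1.drop w.1).take (w.2 + 1 - w.1)) (fun x hx => h x (List.mem_cons_of_mem _ hx))
    · rw [if_neg (by omega : ¬ (((aL : Nat) : Int) = 0 ∨ (w.2 : Int) - (w.1 : Int) + 1 ≤ ((aL : Nat) : Int)))]
      rw [show selStep l1 (aL, aM) w = (aL, aM) by simp only [selStep, if_neg hcond]]
      exact ih aL aM (fun x hx => h x (List.mem_cons_of_mem _ hx))

-- ===== VERDICT (by name: the statement is the Claim_ definition above) =====
theorem moving_window_partial_spec : Claim_equal_moving_window_partial := by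
  unfold Claim_equal_moving_window_partial
  intro s1 s2 hdom hpre
  unfold Spec_moving_window_partial moving_window_partial moving_window_partial_alt
  cases h2 : s2.toList with
  | nil =>
    have hs2 : s2 = "" := String.toList_eq_nil_iff.mp h2
    have hs1 : s1 = "" := by
      rcases hpre with h | h
      · exact absurd hs2 h
      · exact h
    subst hs1; subst hs2
    rw [aLoop, dif_neg (by simp : ¬ (0 < ("".toList : List Char).length))]
    simp
  | cons c0 rest =>
    rw [A_top' s1.toList c0 rest (s1.toList.length + 1) 0 0 0 [] (by omega)]
    have hb := bCollect_eq' s1.toList c0 rest (s1.toList.length + 1) 0 (by omega)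
    simp only [Nat.cast_zero] at hb
    dsimp only
    rw [hb]
    have hfold := B_fold' s1.toList (wins s1.toList c0 rest (s1.toList.length + 1) 0) 0 []
      (fun w hw => wins_bounds' s1.toList c0 rest (s1.toList.length + 1) 0 w hw)
    simp only [Nat.cast_zero] at hfold
    rw [show String.ofList ([] : List Char) = "" from rfl] at hfold
    rw [hfold]
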